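-- pv_equiv track=rewrite | github.com/JeongHoLim/practice | programmers/Lv3/13.py | solution
-- ===== SOURCE A (Python) =====
-- from collections import defaultdict
--
-- def solution(n, k, cmd):
--
--     link = defaultdict(list)
--     deleted = []
--     for i in range(-1,n+1):
--         link[i].extend([i-1,i+1])
--
--     cur = k
--     for c in cmd:
--         op = c.split()
--
--         if op[0] == 'C':
--             deleted.append([cur,link[cur]])
--             l,r = link[cur]
--
--             link[l][1],link[r][0] = r,l
--             cur = r
--             if cur == n:
--                 cur = l
--
--         elif op[0] == 'Z':
--             recovered = deleted.pop()
--             l,r = recovered[1]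
--             link[l][1] = link[r][0] = recovered[0]
--         else:
--             X = int(op[1])
--             if op[0] == 'U':
--                 for _ in range(X):
--                     cur = link[cur][0]
--             else:
--                 for _ in range(X):
--                     cur = link[cur][1]
--
--     answer = ""
--
--     for i in range(n):
--         l = link[i][0]
--         if link[l][1] != i:
--             answer += "X"
--         else: answer += "O"
--
--     return answer
-- ===== SOURCE B (Python) =====
-- def solution(n, k, cmd):
--     alive = [True] * n
--     undo = []
--
--     def nxt(i):
--         i += 1
--         while i < n and not alive[i]:
--             i += 1
--         return i
--
--     def prv(i):
--         i -= 1
--         while i >= 0 and not alive[i]: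
--             i -= 1
--         return i
--
--     cur = k
--     for c in cmd:
--         op = c.split()
--         if op[0] == 'C':
--             undo.append(cur)
--             alive[cur] = False
--             r = nxt(cur)
--             cur = prv(cur) if r == n else r
--         elif op[0] == 'Z':
--             alive[undo.pop()] = True
--         else:
--             X = int(op[1])
--             if op[0] == 'U':
--                 for _ in range(X):
--                     cur = prv(cur)
--             else:
--                 for _ in range(X):
--                     cur = nxt(cur)
--     return ''.join('O' if a else 'X' for a in alive)
-- ===== Notes on version B (the rewrite author's own statement) =====
-- stated objective: alternative
-- what changed: Replaces the defaultdict doubly-linked list of prev/next pointers (with recorded-neighbour undo entries and pointer surgery on delete/restore) by a plain boolean alive array plus a stack of deleted row indices: the cursor moves by scanning for the nearest alive row, undo just re-marks a row alive, and the answer is read directly off the array.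
import Mathlib
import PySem

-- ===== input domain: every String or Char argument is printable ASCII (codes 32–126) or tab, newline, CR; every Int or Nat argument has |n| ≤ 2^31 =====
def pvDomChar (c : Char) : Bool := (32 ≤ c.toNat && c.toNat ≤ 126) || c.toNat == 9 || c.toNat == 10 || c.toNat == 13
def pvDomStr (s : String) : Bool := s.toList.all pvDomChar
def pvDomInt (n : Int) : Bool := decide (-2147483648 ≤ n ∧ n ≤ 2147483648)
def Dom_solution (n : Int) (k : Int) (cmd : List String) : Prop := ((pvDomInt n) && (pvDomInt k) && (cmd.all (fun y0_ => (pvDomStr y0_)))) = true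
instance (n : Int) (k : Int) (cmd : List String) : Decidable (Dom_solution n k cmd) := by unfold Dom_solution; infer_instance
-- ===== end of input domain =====

-- B replaces A's defaultdict doubly-linked list (pointer surgery plus recorded-neighbour undo entries)
-- by a boolean alive array with a stack of deleted indices; the cursor moves by scanning for the
-- nearest alive row. Objective: alternative data structure (not claimed faster). A mutates only its
-- own locals, so the equivalence is about the return value.

-- ===== shared tiny helpers (used by both ports and by Pre_) =====
-- xs[i] = v  (Python list item assignment; pyIdx? resolves a possibly negative index; none = IndexError,
-- where Python raises — such inputs are outside Pre_ and the assignment is a no-op here)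


def pySet {α : Type} (xs : List α) (i : Int) (v : α) : List α :=
  match PySem.List.pyIdx? xs.length i with
  | some j => xs.set j v
  | none => xs

-- 'for _ in range(X): cur = f(cur)' — iterate f exactly X.toNat times (range of a negative X is empty)

def repIter (f : Int → Int) : Nat → Int → Int
  | 0, c => c
  | k+1, c => repIter f k (f c)


-- ===== PORT A =====
-- link[v][0] / link[v][1]; default 0 stands where Python would raise IndexError (outside Pre_)

def idx0 (v : List Int) : Int := PySem.List.pyGetD v 0 0

def idx1 (v : List Int) : Int := PySem.List.pyGetD v 1 0


-- one iteration of A's command loop; the Python 'deleted' list is used only as a stack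
-- (append + pop at the end), ported as a cons-stack with the top at the head; 'deleted.append(
-- [cur, link[cur]])' stores the current value of link[cur] (that list object is never mutated again
-- while cur stays deleted, so storing the value is exact inside Pre_)

def stepA (n : Int) (st : PySem.Dict Int (List Int) × List (Int × List Int) × Int) (c : String) :
    PySem.Dict Int (List Int) × List (Int × List Int) × Int :=
  let link := st.1
  let deleted := st.2.1
  let cur := st.2.2
  let op := PySem.Str.split₀ c
  let h := (PySem.List.pyGet? op 0).getD ""
  if h = "C" then
    let pr := link.getD cur []
    let deleted := (cur, pr) :: deleted
    let l := idx0 pr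
    let r := idx1 pr
    let link := link.insert l ((link.getD l []).set 1 r)
    let link := link.insert r ((link.getD r []).set 0 l)
    let cur := r
    (link, deleted, if cur = n then l else cur)
  else if h = "Z" then
    match deleted with
    | [] => (link, deleted, cur)
    | (x, pr) :: rest =>
      let l := idx0 pr
      let r := idx1 pr
      let link := link.insert l ((link.getD l []).set 1 x)
      let link := link.insert r ((link.getD r []).set 0 x)
      (link, rest, cur)
  else
    let X := (PySem.Int.ofStr? ((PySem.List.pyGet? op 1).getD "")).getD 0
    if h = "U" then
      (link, deleted, repIter (fun cu => idx0 (link.getD cu [])) X.toNat cur)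
    else
      (link, deleted, repIter (fun cu => idx1 (link.getD cu [])) X.toNat cur)


def solution (n : Int) (k : Int) (cmd : List String) : String :=
  let link0 := (PySem.List.pyRange (-1) (n+1) 1).foldl
      (fun d i => d.insert i [i-1, i+1]) PySem.Dict.empty     -- link[i].extend([i-1, i+1])
  let st := cmd.foldl (stepA n) (link0, [], k)
  (PySem.List.pyRange 0 n 1).foldl (fun ans i =>
    if idx1 (st.1.getD (idx0 (st.1.getD i [])) []) ≠ i then ans ++ "X" else ans ++ "O") ""


-- ===== PORT B =====
-- alive[i] (inside Pre_ only read at in-range indices; pyGetD keeps Python's negative-wrap reads exact)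

def aliveAt (alive : List Bool) (i : Int) : Bool := PySem.List.pyGetD alive i false

-- i += 1; while i < n and not alive[i]: i += 1 — (n-(c+1)).toNat is exactly the maximal number of
-- iterations this while loop can still make (it exits on the same condition), so the count is exact

def nxtGo (n : Int) (alive : List Bool) : Nat → Int → Int
  | 0, i => i
  | k+1, i => if i < n ∧ aliveAt alive i = false then nxtGo n alive k (i+1) else i

def nxtScan (n : Int) (alive : List Bool) (c : Int) : Int := nxtGo n alive (n - (c+1)).toNat (c+1)

-- i -= 1; while i >= 0 and not alive[i]: i -= 1

def prvGo (alive : List Bool) : Nat → Int → Int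
  | 0, i => i
  | k+1, i => if 0 ≤ i ∧ aliveAt alive i = false then prvGo alive k (i-1) else i

def prvScan (alive : List Bool) (c : Int) : Int := prvGo alive c.toNat (c-1)

def stepB (n : Int) (st : List Bool × List Int × Int) (c : String) : List Bool × List Int × Int :=
  let alive := st.1
  let undo := st.2.1
  let cur := st.2.2
  let op := PySem.Str.split₀ c
  let h := (PySem.List.pyGet? op 0).getD ""
  if h = "C" then
    let undo := cur :: undo
    let alive := pySet alive cur false
    let r := nxtScan n alive cur
    (alive, undo, if r = n then prvScan alive cur else r)
  else if h = "Z" then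
    match undo with
    | [] => (alive, undo, cur)
    | x :: rest => (pySet alive x true, rest, cur)
  else
    let X := (PySem.Int.ofStr? ((PySem.List.pyGet? op 1).getD "")).getD 0
    if h = "U" then (alive, undo, repIter (prvScan alive) X.toNat cur)
    else (alive, undo, repIter (nxtScan n alive) X.toNat cur)


def solution_alt (n : Int) (k : Int) (cmd : List String) : String :=
  let st := cmd.foldl (stepB n) (List.replicate n.toNat true, [], k)
  PySem.Str.join "" (st.1.map (fun a => if a then "O" else "X"))


-- ===== PRECONDITION & SPEC =====
-- Pre_ must be checkable without materializing the n-element row array (n may be 2^31), so the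
-- safety walk below tracks only the STACK of deleted rows: a row is alive iff it is not on the
-- stack, and these scans step past at most stack.length deleted rows before stopping — exactly
-- where B's array scans stop (nxtScanV_eq / prvScanV_eq below).

def nxtV (n : Int) (st : List Int) : Nat → Int → Int
  | 0, j => j
  | f+1, j => if j < n ∧ j ∈ st then nxtV n st f (j+1) else j

def nxtScanV (n : Int) (st : List Int) (c : Int) : Int := nxtV n st (st.length+1) (c+1)

def prvV (st : List Int) : Nat → Int → Int
  | 0, j => j
  | f+1, j => if 0 ≤ j ∧ j ∈ st then prvV st f (j-1) else j

def prvScanV (st : List Int) (c : Int) : Int := prvV st (st.length+1) (c-1)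

-- 'U X'/'D X' steps are safe for A exactly while the cursor sits on a key of the linked range [-1..n]

def moveChk (n : Int) (f : Int → Int) : Nat → Int → Option Int
  | 0, c => some c
  | k+1, c => if -1 ≤ c ∧ c ≤ n then moveChk n f k (f c) else none


-- Whether every command of A executes without an exception. A raises exactly when a step accesses a
-- dict entry outside the linked range [-1..n] (unpacking/indexing the [] that the defaultdict yields),
-- deletes with the cursor off the rows, pops an empty undo stack, or carries a malformed token
-- (IndexError on op[0], ValueError of int(op[1])). Safety of a step depends on which rows are alive
-- at that step, so the check necessarily walks the commands once; it only checks safety and computes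
-- no output.

def validFrom (n : Int) : List String → List Int → Int → Bool
  | [], _, _ => true
  | c :: rest, stack, cur =>
    match PySem.Str.split₀ c with
    | [] => false
    | h :: t =>
      if h = "C" then
        if 0 ≤ cur ∧ cur < n then
          let st' := cur :: stack
          let r := nxtScanV n st' cur
          validFrom n rest st' (if r = n then prvScanV st' cur else r)
        else false
      else if h = "Z" then
        match stack with
        | [] => false
        | _ :: s => validFrom n rest s cur
      else
        match t with
        | [] => false
        | xs :: _ =>
          match PySem.Int.ofStr? xs with
          | none => false
          | some X =>
            match moveChk n (if h = "U" then prvScanV stack else nxtScanV n stack) X.toNat cur with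
            | none => false
            | some cur' => validFrom n rest stack cur'


def Pre_solution (n : Int) (k : Int) (cmd : List String) : Prop :=
  validFrom n cmd [] k = true
instance (n : Int) (k : Int) (cmd : List String) : Decidable (Pre_solution n k cmd) := by
  unfold Pre_solution; infer_instance

def pvWitness_solution : Int × Int × List String := (3, 1, ["C", "Z", "U 1", "D 1", "C"])

def Spec_solution (n : Int) (k : Int) (cmd : List String) (out : String) : Prop := out = solution_alt n k cmd
instance (n : Int) (k : Int) (cmd : List String) (out : String) : Decidable (Spec_solution n k cmd out) := by
  unfold Spec_solution; infer_instance

-- ===== CLAIM (what is proved, stated in full; the proofs are below) =====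
def Claim_equal_solution : Prop := ∀ (n : Int) (k : Int) (cmd : List String), Dom_solution n k cmd → Pre_solution n k cmd → Spec_solution n k cmd (solution n k cmd)

-- ===== LEMMAS AND PROOFS =====


theorem length_pySet (xs : List Bool) (i : Int) (v : Bool) : (pySet xs i v).length = xs.length := by
  unfold pySet
  cases h : PySem.List.pyIdx? xs.length i <;> simp

theorem pyIdx_nonneg (len : Nat) (i : Int) (h0 : 0 ≤ i) (h1 : i < (len : Int)) :
    PySem.List.pyIdx? len i = some i.toNat := by
  simp [PySem.List.pyIdx?, h0, h1]

theorem aliveAt_pySet_self (xs : List Bool) (i : Int) (v : Bool)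
    (h0 : 0 ≤ i) (h1 : i < (xs.length : Int)) : aliveAt (pySet xs i v) i = v := by
  unfold aliveAt pySet
  rw [pyIdx_nonneg _ _ h0 h1]
  rw [PySem.List.pyGetD_of_nonneg _ _ h0]
  simp only [List.getD, List.getElem?_set]
  have : i.toNat < xs.length := by omega
  simp [this]

theorem aliveAt_pySet_ne (xs : List Bool) (i j : Int) (v : Bool)
    (h0 : 0 ≤ i) (hj : 0 ≤ j) (hne : j ≠ i) : aliveAt (pySet xs i v) j = aliveAt xs j := by
  unfold aliveAt pySet
  cases h : PySem.List.pyIdx? xs.length i with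
  | none => rfl
  | some m =>
    rw [PySem.List.pyGetD_of_nonneg _ _ hj, PySem.List.pyGetD_of_nonneg _ _ hj]
    have hm : m = i.toNat := by
      simp only [PySem.List.pyIdx?] at h
      split_ifs at h <;> simp_all
    have hnm : j.toNat ≠ m := by omega
    simp only [List.getD, List.getElem?_set_ne (Ne.symm hnm)]

theorem pySet_cancel (xs : List Bool) (i : Int) (v : Bool)
    (h0 : 0 ≤ i) (h1 : i < (xs.length : Int)) (hv : aliveAt xs i = v) :
    pySet (pySet xs i (!v)) i v = xs := by
  unfold pySet
  rw [pyIdx_nonneg _ _ h0 h1]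
  simp only []
  rw [pyIdx_nonneg _ _ h0 (by simp; omega)]
  simp only [List.set_set]
  have hlt : i.toNat < xs.length := by omega
  have : xs[i.toNat] = v := by
    unfold aliveAt at hv
    rw [PySem.List.pyGetD_of_nonneg _ _ h0] at hv
    simpa [List.getD, List.getElem?_eq_getElem hlt] using hv
  subst this
  exact List.set_getElem_self hlt

theorem nxtGo_spec (n : Int) (a : List Bool) :
    ∀ (k : Nat) (i : Int), (n - i).toNat = k →
    i ≤ nxtGo n a k i ∧
    (nxtGo n a k i < n → aliveAt a (nxtGo n a k i) = true) ∧
    (∀ m, i ≤ m → m < nxtGo n a k i → m < n ∧ aliveAt a m = false) ∧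
    (i ≤ n → nxtGo n a k i ≤ n) := by
  intro k
  induction k with
  | zero =>
    intro i hf
    simp only [nxtGo]
    refine ⟨le_refl _, by omega, by omega, by omega⟩
  | succ k ih =>
    intro i hf
    simp only [nxtGo]
    by_cases hc : i < n ∧ aliveAt a i = false
    · rw [if_pos hc]
      obtain ⟨ih1, ih2, ih3, ih4⟩ := ih (i+1) (by omega)
      refine ⟨by omega, ih2, ?_, fun _ => ih4 (by omega)⟩
      intro m hm1 hm2
      rcases eq_or_lt_of_le hm1 with h | h
      · exact ⟨by omega, h ▸ hc.2⟩
      · exact ih3 m (by omega) hm2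
    · rw [if_neg hc]
      refine ⟨le_refl _, ?_, by omega, by omega⟩
      intro h
      rcases Decidable.not_and_iff_not_or_not.mp hc with h' | h'
      · omega
      · simpa using h'

theorem nxtScan_spec (n : Int) (a : List Bool) (c : Int) :
    c < nxtScan n a c ∧
    (nxtScan n a c < n → aliveAt a (nxtScan n a c) = true) ∧
    (∀ m, c < m → m < nxtScan n a c → m < n ∧ aliveAt a m = false) ∧
    (c < n → nxtScan n a c ≤ n) := by
  obtain ⟨h1, h2, h3, h4⟩ := nxtGo_spec n a (n - (c+1)).toNat (c+1) rfl
  unfold nxtScan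
  exact ⟨by omega, h2, fun m hm1 hm2 => h3 m (by omega) hm2, fun h => h4 (by omega)⟩

theorem nxtScan_of_ge (n : Int) (a : List Bool) (c : Int) (h : n ≤ c) : nxtScan n a c = c + 1 := by
  unfold nxtScan
  rw [show (n - (c+1)).toNat = 0 by omega]
  rfl

theorem prvGo_spec (a : List Bool) :
    ∀ (k : Nat) (i : Int), (i + 1).toNat = k →
    prvGo a k i ≤ i ∧
    (0 ≤ prvGo a k i → aliveAt a (prvGo a k i) = true) ∧
    (∀ m, prvGo a k i < m → m ≤ i → 0 ≤ m ∧ aliveAt a m = false) ∧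
    (-1 ≤ i → -1 ≤ prvGo a k i) := by
  intro k
  induction k with
  | zero =>
    intro i hf
    simp only [prvGo]
    refine ⟨le_refl _, by omega, by omega, by omega⟩
  | succ k ih =>
    intro i hf
    simp only [prvGo]
    by_cases hc : 0 ≤ i ∧ aliveAt a i = false
    · rw [if_pos hc]
      obtain ⟨ih1, ih2, ih3, ih4⟩ := ih (i-1) (by omega)
      refine ⟨by omega, ih2, ?_, fun _ => ih4 (by omega)⟩
      intro m hm1 hm2
      rcases eq_or_lt_of_le hm2 with h | h
      · exact ⟨by omega, h ▸ hc.2⟩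
      · exact ih3 m hm1 (by omega)
    · rw [if_neg hc]
      refine ⟨le_refl _, ?_, by omega, by omega⟩
      intro h
      rcases Decidable.not_and_iff_not_or_not.mp hc with h' | h'
      · omega
      · simpa using h'

theorem prvScan_spec (a : List Bool) (c : Int) :
    prvScan a c < c ∧
    (0 ≤ prvScan a c → aliveAt a (prvScan a c) = true) ∧
    (∀ m, prvScan a c < m → m < c → 0 ≤ m ∧ aliveAt a m = false) ∧
    (0 ≤ c → -1 ≤ prvScan a c) := by
  obtain ⟨h1, h2, h3, h4⟩ := prvGo_spec a c.toNat (c-1) (by omega)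
  unfold prvScan
  exact ⟨by omega, h2, fun m hm1 hm2 => h3 m hm1 (by omega), fun h => h4 (by omega)⟩

theorem prvScan_of_nonpos (a : List Bool) (c : Int) (h : c ≤ 0) : prvScan a c = c - 1 := by
  unfold prvScan
  rw [show c.toNat = 0 by omega]
  rfl

theorem nxtScan_eq_of_alive (n : Int) (a : List Bool) (c j : Int)
    (h1 : c < j) (h2 : j < n) (h3 : aliveAt a j = true)
    (h4 : ∀ m, c < m → m < j → aliveAt a m = false) : nxtScan n a c = j := by
  obtain ⟨e1, e2, e3, e4⟩ := nxtScan_spec n a c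
  rcases lt_trichotomy (nxtScan n a c) j with h | h | h
  · have := h4 _ e1 h
    have := e2 (by omega)
    simp_all
  · exact h
  · have := (e3 j h1 h).2
    simp_all

theorem nxtScan_eq_n (n : Int) (a : List Bool) (c : Int)
    (h1 : c < n) (h4 : ∀ m, c < m → m < n → aliveAt a m = false) : nxtScan n a c = n := by
  obtain ⟨e1, e2, e3, e4⟩ := nxtScan_spec n a c
  rcases lt_trichotomy (nxtScan n a c) n with h | h | h
  · have := h4 _ e1 h
    have := e2 h
    simp_all
  · exact h
  · omega

theorem prvScan_eq_of_alive (a : List Bool) (c j : Int)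
    (h1 : j < c) (h2 : 0 ≤ j) (h3 : aliveAt a j = true)
    (h4 : ∀ m, j < m → m < c → aliveAt a m = false) : prvScan a c = j := by
  obtain ⟨e1, e2, e3, e4⟩ := prvScan_spec a c
  rcases lt_trichotomy (prvScan a c) j with h | h | h
  · have := (e3 j h h1).2
    simp_all
  · exact h
  · have := h4 _ h e1
    have := e2 (by omega)
    simp_all

theorem prvScan_eq_neg_one (a : List Bool) (c : Int)
    (h1 : 0 ≤ c) (h4 : ∀ m, 0 ≤ m → m < c → aliveAt a m = false) : prvScan a c = -1 := by
  obtain ⟨e1, e2, e3, e4⟩ := prvScan_spec a c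
  rcases lt_trichotomy (prvScan a c) (-1) with h | h | h
  · omega
  · exact h
  · have := h4 _ (by omega) e1
    have := e2 (by omega)
    simp_all

theorem nxt_prv_of_alive (n : Int) (a : List Bool) (i : Int)
    (h0 : 0 ≤ i) (h1 : i < n) (ha : aliveAt a i = true) : nxtScan n a (prvScan a i) = i := by
  obtain ⟨p1, p2, p3, p4⟩ := prvScan_spec a i
  exact nxtScan_eq_of_alive n a _ i p1 h1 ha (fun m hm1 hm2 => (p3 m hm1 hm2).2)

theorem prv_nxt_of_alive (n : Int) (a : List Bool) (i : Int)
    (h0 : 0 ≤ i) (ha : aliveAt a i = true) : prvScan a (nxtScan n a i) = i := by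
  obtain ⟨e1, e2, e3, e4⟩ := nxtScan_spec n a i
  exact prvScan_eq_of_alive a _ i e1 h0 ha (fun m hm1 hm2 => (e3 m hm1 hm2).2)

theorem nxtScan_pySet_false (n : Int) (a : List Bool) (x c : Int)
    (hlen : (a.length : Int) = n) (hx0 : 0 ≤ x) (hx1 : x < n) (hax : aliveAt a x = true)
    (hc : -1 ≤ c) :
    nxtScan n (pySet a x false) c =
      if nxtScan n a c = x then nxtScan n a x else nxtScan n a c := by
  obtain ⟨e1, e2, e3, e4⟩ := nxtScan_spec n a c
  have hdead : aliveAt (pySet a x false) x = false := aliveAt_pySet_self a x false hx0 (by omega)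
  by_cases h : nxtScan n a c = x
  · rw [if_pos h]
    obtain ⟨f1, f2, f3, f4⟩ := nxtScan_spec n a x
    -- gap of the combined scan: (c, nxtScan a x) minus x is dead in a, and x is dead in a'
    have hgap : ∀ m, c < m → m < nxtScan n a x → aliveAt (pySet a x false) m = false := by
      intro m hm1 hm2
      by_cases hmx : m = x
      · exact hmx ▸ hdead
      · rw [aliveAt_pySet_ne a x m false hx0 (by omega) hmx]
        rcases lt_trichotomy m x with hmm | hmm | hmm
        · exact (e3 m hm1 (h ▸ hmm)).2
        · omega
        · exact (f3 m hmm hm2).2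
    rcases lt_trichotomy (nxtScan n a x) n with hj | hj | hj
    · refine nxtScan_eq_of_alive n _ c _ (by omega) hj ?_ hgap
      rw [aliveAt_pySet_ne a x _ false hx0 (by omega) (by omega)]
      exact f2 hj
    · rw [hj]
      exact nxtScan_eq_n n _ c (by omega) (fun m hm1 hm2 => hgap m hm1 (by omega))
    · omega
  · rw [if_neg h]
    -- x is not in the half-open gap (c, nxtScan a c]
    have hxgap : ¬ (c < x ∧ x < nxtScan n a c) := by
      rintro ⟨g1, g2⟩
      have := (e3 x g1 g2).2
      simp_all
    rcases le_or_gt n c with hcn | hcn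
    · rw [nxtScan_of_ge n _ c hcn, nxtScan_of_ge n a c hcn]
    · have hle := e4 hcn
      have hgap' : ∀ m, c < m → m < nxtScan n a c → aliveAt (pySet a x false) m = false := by
        intro m hm1 hm2
        have hmx : m ≠ x := by rintro rfl; exact hxgap ⟨hm1, hm2⟩
        rw [aliveAt_pySet_ne a x m false hx0 (by omega) hmx]
        exact (e3 m hm1 hm2).2
      rcases lt_trichotomy (nxtScan n a c) n with hj | hj | hj
      · refine nxtScan_eq_of_alive n _ c _ e1 hj ?_ hgap'
        rw [aliveAt_pySet_ne a x _ false hx0 (by omega) h]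
        exact e2 hj
      · rw [hj]
        exact nxtScan_eq_n n _ c hcn (fun m hm1 hm2 => hgap' m hm1 (by omega))
      · omega

theorem prvScan_pySet_false (n : Int) (a : List Bool) (x c : Int)
    (hlen : (a.length : Int) = n) (hx0 : 0 ≤ x) (hx1 : x < n) (hax : aliveAt a x = true) :
    prvScan (pySet a x false) c =
      if prvScan a c = x then prvScan a x else prvScan a c := by
  obtain ⟨e1, e2, e3, e4⟩ := prvScan_spec a c
  have hdead : aliveAt (pySet a x false) x = false := aliveAt_pySet_self a x false hx0 (by omega)
  by_cases h : prvScan a c = x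
  · rw [if_pos h]
    obtain ⟨f1, f2, f3, f4⟩ := prvScan_spec a x
    have hgap : ∀ m, prvScan a x < m → m < c → aliveAt (pySet a x false) m = false := by
      intro m hm1 hm2
      by_cases hmx : m = x
      · exact hmx ▸ hdead
      · rcases lt_trichotomy m x with hmm | hmm | hmm
        · rw [aliveAt_pySet_ne a x m false hx0 (f3 m hm1 hmm).1 hmx]
          exact (f3 m hm1 hmm).2
        · omega
        · rw [aliveAt_pySet_ne a x m false hx0 (by omega) hmx]
          exact (e3 m (h ▸ hmm) hm2).2
    rcases lt_trichotomy (prvScan a x) (-1) with hj | hj | hj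
    · omega
    · exact hj ▸ prvScan_eq_neg_one _ c (by omega) (fun m hm1 hm2 => hgap m (by omega) hm2)
    · refine prvScan_eq_of_alive _ c _ (by omega) (by omega) ?_ hgap
      rw [aliveAt_pySet_ne a x _ false hx0 (by omega) (by omega)]
      exact f2 (by omega)
  · rw [if_neg h]
    have hxgap : ¬ (prvScan a c < x ∧ x < c) := by
      rintro ⟨g1, g2⟩
      have := (e3 x g1 g2).2
      simp_all
    have hgap' : ∀ m, prvScan a c < m → m < c → aliveAt (pySet a x false) m = false := by
      intro m hm1 hm2
      have hmx : m ≠ x := by rintro rfl; exact hxgap ⟨hm1, hm2⟩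
      rw [aliveAt_pySet_ne a x m false hx0 (e3 m hm1 hm2).1 hmx]
      exact (e3 m hm1 hm2).2
    rcases le_or_gt c 0 with hc0 | hc0
    · rw [prvScan_of_nonpos _ c hc0, prvScan_of_nonpos a c hc0]
    · rcases lt_trichotomy (prvScan a c) (-1) with hj | hj | hj
      · have := e4 (by omega); omega
      · exact hj ▸ prvScan_eq_neg_one _ c (by omega) (fun m hm1 hm2 => hgap' m (by omega) hm2)
      · refine prvScan_eq_of_alive _ c _ e1 (by omega) ?_ hgap'
        rw [aliveAt_pySet_ne a x _ false hx0 (by omega) h]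
        exact e2 (by omega)

theorem idx0_pair (p q : Int) : idx0 [p, q] = p := rfl

theorem idx1_pair (p q : Int) : idx1 [p, q] = q := rfl


-- ===== the simulation invariant =====
-- sentinel-or-alive: the indices whose link entry A keeps current

def SOS (n : Int) (alive : List Bool) (i : Int) : Prop :=
  i = -1 ∨ i = n ∨ (0 ≤ i ∧ i < n ∧ aliveAt alive i = true)

def DictChar (n : Int) (D : PySem.Dict Int (List Int)) (alive : List Bool) : Prop :=
  ∀ i, SOS n alive i → D.getD i [] = [prvScan alive i, nxtScan n alive i]

def StackInv (n : Int) (D : PySem.Dict Int (List Int)) : List Int → List Bool → List (Int × List Int) → Prop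
  | [], _, ds => ds = []
  | x :: xs, alive, ds =>
    ∃ ds', ds = (x, [prvScan (pySet alive x true) x, nxtScan n (pySet alive x true) x]) :: ds' ∧
      0 ≤ x ∧ x < n ∧ aliveAt alive x = false ∧
      D.getD x [] = [prvScan (pySet alive x true) x, nxtScan n (pySet alive x true) x] ∧
      StackInv n D xs (pySet alive x true) ds'

def SimInv (n : Int) (D : PySem.Dict Int (List Int)) (ds : List (Int × List Int))
    (alive : List Bool) (us : List Int) (cur : Int) : Prop :=
  (alive.length : Int) = n ∧
  (∀ i, 0 ≤ i → i < n → aliveAt alive i = false → i ∈ us) ∧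
  (0 ≤ cur → cur < n → aliveAt alive cur = true) ∧
  DictChar n D alive ∧
  StackInv n D us alive ds

def Hgood (n : Int) (D : PySem.Dict Int (List Int)) (alive : List Bool) : Prop :=
  ∀ l, (l = -1 ∨ (0 ≤ l ∧ l < n ∧ aliveAt alive l = true)) →
    (0 ≤ idx1 (D.getD l []) → idx1 (D.getD l []) < n → aliveAt alive (idx1 (D.getD l [])) = true)

theorem stackInv_mem (n : Int) (D : PySem.Dict Int (List Int)) :
    ∀ (us : List Int) (alive : List Bool) (ds : List (Int × List Int)),
    (alive.length : Int) = n → StackInv n D us alive ds →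
    ∀ x ∈ us, 0 ≤ x ∧ x < n ∧ aliveAt alive x = false := by
  intro us
  induction us with
  | nil => intro alive ds _ _ x hx; simp at hx
  | cons y ys ih =>
    intro alive ds hlen hst x hx
    obtain ⟨ds', hds, hy0, hy1, hdead, hD, hst'⟩ := hst
    rcases List.mem_cons.mp hx with rfl | hx'
    · exact ⟨hy0, hy1, hdead⟩
    · have hlen' : ((pySet alive y true).length : Int) = n := by rw [length_pySet]; exact hlen
      obtain ⟨g0, g1, g2⟩ := ih (pySet alive y true) ds' hlen' hst' x hx'
      refine ⟨g0, g1, ?_⟩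
      have hxy : x ≠ y := by
        rintro rfl
        rw [aliveAt_pySet_self alive x true hy0 (by omega)] at g2
        simp at g2
      rw [aliveAt_pySet_ne alive y x true hy0 g0 hxy] at g2
      exact g2

theorem stackInv_congrD (n : Int) (D D' : PySem.Dict Int (List Int)) :
    ∀ (us : List Int) (alive : List Bool) (ds : List (Int × List Int)),
    (∀ x ∈ us, D'.getD x [] = D.getD x []) →
    StackInv n D us alive ds → StackInv n D' us alive ds := by
  intro us
  induction us with
  | nil => intro alive ds _ h; exact h
  | cons y ys ih =>
    intro alive ds hagree hst
    obtain ⟨ds', hds, hy0, hy1, hdead, hD, hst'⟩ := hst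
    exact ⟨ds', hds, hy0, hy1, hdead,
      (hagree y (List.mem_cons_self)).trans hD,
      ih _ ds' (fun x hx => hagree x (List.mem_cons_of_mem _ hx)) hst'⟩

theorem stackInv_nodup (n : Int) (D : PySem.Dict Int (List Int)) :
    ∀ (us : List Int) (alive : List Bool) (ds : List (Int × List Int)),
    (alive.length : Int) = n → StackInv n D us alive ds → us.Nodup := by
  intro us
  induction us with
  | nil => intro alive ds _ _; exact List.nodup_nil
  | cons x xs ih =>
    intro alive ds hlen hst
    obtain ⟨ds', hds, hx0, hx1, hdead, hD, hst'⟩ := hst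
    have hlen' : ((pySet alive x true).length : Int) = n := by rw [length_pySet]; exact hlen
    refine List.nodup_cons.mpr ⟨?_, ih _ ds' hlen' hst'⟩
    intro habs
    have := (stackInv_mem n D xs (pySet alive x true) ds' hlen' hst' x habs).2.2
    rw [aliveAt_pySet_self alive x true hx0 (by omega)] at this
    simp at this

theorem hgood_of_dictChar (n : Int) (D : PySem.Dict Int (List Int)) (alive : List Bool)
    (h : DictChar n D alive) : Hgood n D alive := by
  intro l hl
  have hsos : SOS n alive l := by
    rcases hl with h' | h'
    · exact Or.inl h'
    · exact Or.inr (Or.inr h')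
  rw [h l hsos, idx1_pair]
  intro _ hlt
  exact (nxtScan_spec n alive l).2.1 hlt

theorem dead_ptr (n : Int) (D : PySem.Dict Int (List Int)) :
    ∀ (us : List Int) (alive : List Bool) (ds : List (Int × List Int)),
    (alive.length : Int) = n → Hgood n D alive → StackInv n D us alive ds →
    ∀ i ∈ us, idx1 (D.getD (idx0 (D.getD i [])) []) ≠ i := by
  intro us
  induction us with
  | nil => intro alive ds _ _ _ i hi; simp at hi
  | cons x xs ih =>
    intro alive ds hlen hgood hst i hi
    obtain ⟨ds', hds, hx0, hx1, hdead, hD, hst'⟩ := hst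
    have hlen' : ((pySet alive x true).length : Int) = n := by rw [length_pySet]; exact hlen
    have haliveX : aliveAt (pySet alive x true) x = true :=
      aliveAt_pySet_self alive x true hx0 (by omega)
    rcases List.mem_cons.mp hi with rfl | hi'
    · -- the just-deleted row itself
      rw [hD, idx0_pair]
      set l := prvScan (pySet alive i true) i with hl
      obtain ⟨p1, p2, p3, p4⟩ := prvScan_spec (pySet alive i true) i
      have hlo : l = -1 ∨ (0 ≤ l ∧ l < n ∧ aliveAt alive l = true) := by
        rcases lt_or_ge l 0 with h' | h'
        · left; omega
        · right
          refine ⟨h', by omega, ?_⟩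
          have := p2 h'
          rwa [aliveAt_pySet_ne alive i l true hx0 h' (by omega)] at this
      intro habs
      have := hgood l hlo
      rw [habs] at this
      have := this hx0 hx1
      simp_all
    · -- a row deleted earlier: recurse with x re-added
      refine ih (pySet alive x true) ds' hlen' ?_ hst' i hi'
      intro l hl
      by_cases hlx : l = x
      · subst hlx
        rw [hD, idx1_pair]
        intro h0 h1
        exact (nxtScan_spec n (pySet alive l true) l).2.1 h1
      · have hl' : l = -1 ∨ (0 ≤ l ∧ l < n ∧ aliveAt alive l = true) := by
          rcases hl with h' | h'
          · exact Or.inl h'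
          · right
            refine ⟨h'.1, h'.2.1, ?_⟩
            rw [aliveAt_pySet_ne alive x l true hx0 h'.1 hlx] at h'
            exact h'.2.2
        intro h0 h1
        have hv := hgood l hl' h0 h1
        have hvx : idx1 (D.getD l []) ≠ x := by
          intro habs
          rw [habs] at hv
          simp_all
        rw [aliveAt_pySet_ne alive x _ true hx0 h0 hvx]
        exact hv

theorem pyget0 {α : Type} (h : α) (t : List α) : PySem.List.pyGet? (h :: t) 0 = some h := by
  simp [PySem.List.pyGet?, PySem.List.pyIdx?]

theorem pyget1 {α : Type} (h x : α) (t : List α) : PySem.List.pyGet? (h :: x :: t) 1 = some x := by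
  have hidx : PySem.List.pyIdx? (h :: x :: t).length 1 = some 1 := by
    simp only [PySem.List.pyIdx?, List.length_cons]
    rw [if_pos (by norm_num), if_pos (by push_cast; omega)]
    rfl
  simp only [PySem.List.pyGet?, hidx, Option.bind_some]
  rfl

theorem C_arm (n : Int) (D : PySem.Dict Int (List Int)) (ds : List (Int × List Int))
    (a : List Bool) (us : List Int) (cur : Int) (c : String) (t : List String)
    (hsplit : PySem.Str.split₀ c = "C" :: t)
    (hInv : SimInv n D ds a us cur) (h0 : 0 ≤ cur) (h1 : cur < n) :
    stepA n (D, ds, cur) c =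
      ((D.insert (prvScan a cur) [prvScan a (prvScan a cur), nxtScan n a cur]).insert
        (nxtScan n a cur) [prvScan a cur, nxtScan n a (nxtScan n a cur)],
       (cur, [prvScan a cur, nxtScan n a cur]) :: ds,
       if nxtScan n a cur = n then prvScan a cur else nxtScan n a cur) ∧
    stepB n (a, us, cur) c =
      (pySet a cur false, cur :: us,
       if nxtScan n a cur = n then prvScan a cur else nxtScan n a cur) ∧
    nxtScan n (pySet a cur false) cur = nxtScan n a cur ∧
    prvScan (pySet a cur false) cur = prvScan a cur ∧
    SimInv n
      ((D.insert (prvScan a cur) [prvScan a (prvScan a cur), nxtScan n a cur]).insert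
        (nxtScan n a cur) [prvScan a cur, nxtScan n a (nxtScan n a cur)])
      ((cur, [prvScan a cur, nxtScan n a cur]) :: ds)
      (pySet a cur false) (cur :: us)
      (if nxtScan n a cur = n then prvScan a cur else nxtScan n a cur) := by
  obtain ⟨hlen, hdeadIff, hcur, hchar, hstack⟩ := hInv
  have hacur : aliveAt a cur = true := hcur h0 h1
  obtain ⟨p1, p2, p3, p4⟩ := prvScan_spec a cur
  obtain ⟨e1, e2, e3, e4⟩ := nxtScan_spec n a cur
  have hpq : (prvScan a cur) < cur ∧ cur < (nxtScan n a cur) := ⟨p1, e1⟩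
  have hqn : (nxtScan n a cur) ≤ n := e4 h1
  have hp1 : -1 ≤ (prvScan a cur) := p4 h0
  have hSOSp : SOS n a (prvScan a cur) := by
    rcases lt_or_ge (prvScan a cur) 0 with h' | h'
    · left; omega
    · right; right; exact ⟨h', by omega, p2 h'⟩
  have hSOSq : SOS n a (nxtScan n a cur) := by
    rcases eq_or_lt_of_le hqn with h' | h'
    · right; left; exact h'
    · right; right; exact ⟨by omega, h', e2 h'⟩
  have hSOScur : SOS n a cur := Or.inr (Or.inr ⟨h0, h1, hacur⟩)
  have hprcur : D.getD cur [] = [(prvScan a cur), (nxtScan n a cur)] := hchar cur hSOScur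
  have hprp : D.getD (prvScan a cur) [] = [prvScan a (prvScan a cur), nxtScan n a (prvScan a cur)] := hchar (prvScan a cur) hSOSp
  have hprq : D.getD (nxtScan n a cur) [] = [prvScan a (nxtScan n a cur), nxtScan n a (nxtScan n a cur)] := hchar (nxtScan n a cur) hSOSq
  have hpqne : (prvScan a cur) ≠ (nxtScan n a cur) := by omega
  -- the value of A's step
  have hA : stepA n (D, ds, cur) c =
      ((D.insert (prvScan a cur) [prvScan a (prvScan a cur), (nxtScan n a cur)]).insert (nxtScan n a cur) [(prvScan a cur), nxtScan n a (nxtScan n a cur)],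
       (cur, [(prvScan a cur), (nxtScan n a cur)]) :: ds, if (nxtScan n a cur) = n then (prvScan a cur) else (nxtScan n a cur)) := by
    show (if ((PySem.List.pyGet? (PySem.Str.split₀ c) 0).getD "") = "C" then _ else _) = _
    rw [hsplit, pyget0]
    simp only [Option.getD_some, if_pos rfl, hprcur, idx0_pair, idx1_pair, hprp, hprq]
    have h2 : ((D.insert (prvScan a cur) ([prvScan a (prvScan a cur), nxtScan n a (prvScan a cur)].set 1 (nxtScan n a cur))).getD (nxtScan n a cur) []) =
        [prvScan a (nxtScan n a cur), nxtScan n a (nxtScan n a cur)] := by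
      rw [PySem.Dict.getD_insert]
      rw [if_neg (Ne.symm hpqne)]
      exact hprq
    rw [h2]
    rfl
  -- the value of B's step
  set a' := pySet a cur false with ha'
  have hlen' : ((a'.length : Int)) = n := by rw [ha', length_pySet]; exact hlen
  have hnxt' : nxtScan n a' cur = (nxtScan n a cur) := by
    rw [ha', nxtScan_pySet_false n a cur cur hlen h0 h1 hacur (by omega), if_neg (by omega)]
  have hprv' : prvScan a' cur = (prvScan a cur) := by
    rw [ha', prvScan_pySet_false n a cur cur hlen h0 h1 hacur, if_neg (by omega)]
  have hB : stepB n (a, us, cur) c = (a', cur :: us, if (nxtScan n a cur) = n then (prvScan a cur) else (nxtScan n a cur)) := by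
    show (if ((PySem.List.pyGet? (PySem.Str.split₀ c) 0).getD "") = "C" then _ else _) = _
    rw [hsplit, pyget0]
    simp only [Option.getD_some]
    rw [if_true, ← ha', hnxt', hprv']
  refine ⟨hA, hB, hnxt', hprv', ?_⟩
  -- dead/alive bookkeeping in a'
  have hdead' : aliveAt a' cur = false := by
    rw [ha']; exact aliveAt_pySet_self a cur false h0 (by omega)
  have htrans : ∀ i, 0 ≤ i → i ≠ cur → aliveAt a' i = aliveAt a i := by
    intro i hi hne
    rw [ha']; exact aliveAt_pySet_ne a cur i false h0 hi hne
  -- the updated dict, pointwise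
  set D' := (D.insert (prvScan a cur) [prvScan a (prvScan a cur), (nxtScan n a cur)]).insert (nxtScan n a cur) [(prvScan a cur), nxtScan n a (nxtScan n a cur)] with hD'
  have hgetD' : ∀ i, D'.getD i [] =
      if i = (nxtScan n a cur) then [(prvScan a cur), nxtScan n a (nxtScan n a cur)] else if i = (prvScan a cur) then [prvScan a (prvScan a cur), (nxtScan n a cur)] else D.getD i [] := by
    intro i
    rw [hD', PySem.Dict.getD_insert, PySem.Dict.getD_insert]
  -- scans in a' versus scans in a
  have hnxtA : ∀ i, -1 ≤ i → nxtScan n a' i = if nxtScan n a i = cur then (nxtScan n a cur) else nxtScan n a i := by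
    intro i hi
    rw [ha', nxtScan_pySet_false n a cur i hlen h0 h1 hacur hi]
  have hprvA : ∀ i, prvScan a' i = if prvScan a i = cur then (prvScan a cur) else prvScan a i := by
    intro i
    rw [ha', prvScan_pySet_false n a cur i hlen h0 h1 hacur]
  -- if the next-alive of i is cur then i is (prvScan a cur), and dually
  have hnxt_cur : ∀ i, SOS n a i → i ≠ (prvScan a cur) → nxtScan n a i ≠ cur := by
    intro i hsos hip habs
    obtain ⟨f1, f2, f3, f4⟩ := nxtScan_spec n a i
    have hicur : i < cur := by omega
    have hgap : ∀ m, i < m → m < cur → aliveAt a m = false := by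
      intro m hm1 hm2
      exact (f3 m hm1 (by omega)).2
    rcases hsos with rfl | rfl | ⟨hi0, hi1, hia⟩
    · exact hip (prvScan_eq_neg_one a cur h0 (fun m hm1 hm2 => hgap m (by omega) hm2)).symm
    · omega
    · exact hip (prvScan_eq_of_alive a cur i hicur hi0 hia hgap).symm
  have hprv_cur : ∀ i, SOS n a i → i ≠ (nxtScan n a cur) → prvScan a i ≠ cur := by
    intro i hsos hiq habs
    obtain ⟨f1, f2, f3, f4⟩ := prvScan_spec a i
    have hicur : cur < i := by omega
    have hgap : ∀ m, cur < m → m < i → aliveAt a m = false := by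
      intro m hm1 hm2
      exact (f3 m (by omega) hm2).2
    rcases hsos with rfl | rfl | ⟨hi0, hi1, hia⟩
    · omega
    · exact hiq ((nxtScan_eq_n _ a cur h1 hgap).symm)
    · exact hiq ((nxtScan_eq_of_alive n a cur i hicur hi1 hia hgap).symm)
  refine ⟨hlen', ?_, ?_, ?_, ?_⟩
  · -- dead rows are on the stack
    intro i hi0 hi1 hidead
    by_cases hic : i = cur
    · exact hic ▸ List.mem_cons_self
    · rw [htrans i hi0 hic] at hidead
      exact List.mem_cons_of_mem _ (hdeadIff i hi0 hi1 hidead)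
  · -- the new cursor is alive (or a sentinel)
    intro hc0 hc1
    by_cases hqc : (nxtScan n a cur) = n
    · rw [if_pos hqc] at hc0 hc1 ⊢
      rw [htrans _ hc0 (by omega)]
      exact p2 hc0
    · rw [if_neg hqc] at hc0 hc1 ⊢
      rw [htrans _ hc0 (by omega)]
      exact e2 (by omega)
  · -- DictChar for the shrunk row set
    intro i hsos
    have hicur : i ≠ cur := by
      rcases hsos with rfl | rfl | ⟨g0, g1, g2⟩
      · omega
      · omega
      · intro habs; rw [habs, hdead'] at g2; simp at g2
    have hsosA : SOS n a i := by
      rcases hsos with rfl | rfl | ⟨g0, g1, g2⟩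
      · exact Or.inl rfl
      · exact Or.inr (Or.inl rfl)
      · exact Or.inr (Or.inr ⟨g0, g1, by rw [← htrans i g0 hicur]; exact g2⟩)
    have hige : -1 ≤ i := by
      rcases hsosA with rfl | rfl | ⟨g0, _, _⟩ <;> omega
    rw [hgetD' i]
    by_cases hiq : i = (nxtScan n a cur)
    · rw [if_pos hiq, hiq]
      have hni : nxtScan n a' (nxtScan n a cur) = nxtScan n a (nxtScan n a cur) := by
        rw [hnxtA (nxtScan n a cur) (by omega), if_neg]
        obtain ⟨f1, _, _, _⟩ := nxtScan_spec n a (nxtScan n a cur)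
        omega
      have hpi : prvScan a' (nxtScan n a cur) = (prvScan a cur) := by
        have hgap : ∀ m, (prvScan a cur) < m → m < (nxtScan n a cur) → aliveAt a' m = false := by
          intro m hm1 hm2
          by_cases hmc : m = cur
          · exact hmc ▸ hdead'
          · rw [htrans m (by omega) hmc]
            rcases lt_trichotomy m cur with hmm | hmm | hmm
            · exact (p3 m hm1 hmm).2
            · omega
            · exact (e3 m hmm hm2).2
        rcases lt_or_ge (prvScan a cur) 0 with hpneg | hppos
        · rw [show (prvScan a cur) = -1 by omega]
          exact prvScan_eq_neg_one a' (nxtScan n a cur) (by omega)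
            (fun m hm1 hm2 => hgap m (by omega) hm2)
        · refine prvScan_eq_of_alive a' (nxtScan n a cur) (prvScan a cur) (by omega) hppos ?_ hgap
          rw [htrans (prvScan a cur) hppos (by omega)]
          exact p2 hppos
      rw [hpi, hni]
    · rw [if_neg hiq]
      by_cases hip : i = (prvScan a cur)
      · rw [if_pos hip, hip]
        have hni : nxtScan n a' (prvScan a cur) = (nxtScan n a cur) := by
          rw [hnxtA (prvScan a cur) hp1, if_pos]
          rcases lt_or_ge (prvScan a cur) 0 with hpneg | hppos
          · rw [show (prvScan a cur) = -1 by omega]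
            exact nxtScan_eq_of_alive n a (-1) cur (by omega) h1 hacur
              (fun m hm1 hm2 => (p3 m (by omega) hm2).2)
          · exact nxt_prv_of_alive n a cur h0 h1 hacur
        have hpi : prvScan a' (prvScan a cur) = prvScan a (prvScan a cur) := by
          rw [hprvA (prvScan a cur), if_neg]
          obtain ⟨f1, _, _, _⟩ := prvScan_spec a (prvScan a cur)
          omega
        rw [hni, hpi]
      · rw [if_neg hip]
        rw [hchar i hsosA]
        have hni : nxtScan n a' i = nxtScan n a i := by
          rw [hnxtA i hige, if_neg (hnxt_cur i hsosA hip)]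
        have hpi : prvScan a' i = prvScan a i := by
          rw [hprvA i, if_neg (hprv_cur i hsosA hiq)]
        rw [hni, hpi]
  · -- StackInv with the new entry on top
    have hrestore : pySet a' cur true = a := by
      rw [ha']
      exact pySet_cancel a cur true h0 (by omega) hacur
    refine ⟨ds, ?_, h0, h1, hdead', ?_, ?_⟩
    · rw [hrestore]
    · rw [hrestore, hgetD' cur, if_neg (by omega), if_neg (by omega)]
      exact hprcur
    · rw [hrestore]
      refine stackInv_congrD n D D' us a ds ?_ hstack
      intro x hx
      obtain ⟨g0, g1, g2⟩ := stackInv_mem n D us a ds hlen hstack x hx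
      have hxp : x ≠ (prvScan a cur) := by
        rcases hSOSp with h' | h' | ⟨_, _, hpa⟩
        · omega
        · omega
        · intro habs; rw [← habs] at hpa; simp_all
      have hxq : x ≠ (nxtScan n a cur) := by
        rcases hSOSq with h' | h' | ⟨_, _, hqa⟩
        · omega
        · omega
        · intro habs; rw [← habs] at hqa; simp_all
      rw [hgetD' x, if_neg hxq, if_neg hxp]

theorem Z_arm (n : Int) (D : PySem.Dict Int (List Int)) (ds' : List (Int × List Int))
    (a : List Bool) (x : Int) (us' : List Int) (cur : Int)
    (hInv : SimInv n D ((x, [prvScan (pySet a x true) x, nxtScan n (pySet a x true) x]) :: ds')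
      a (x :: us') cur) :
    ((D.getD (prvScan (pySet a x true) x) []).set 1 x =
      [prvScan a (prvScan (pySet a x true) x), x]) ∧
    (((D.insert (prvScan (pySet a x true) x)
        [prvScan a (prvScan (pySet a x true) x), x]).getD (nxtScan n (pySet a x true) x) []).set 0 x =
      [x, nxtScan n a (nxtScan n (pySet a x true) x)]) ∧
    SimInv n
      ((D.insert (prvScan (pySet a x true) x)
          [prvScan a (prvScan (pySet a x true) x), x]).insert
        (nxtScan n (pySet a x true) x)
          [x, nxtScan n a (nxtScan n (pySet a x true) x)])
      ds' (pySet a x true) us' cur := by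
  obtain ⟨hlen, hdeadIff, hcur, hchar, hstack⟩ := hInv
  obtain ⟨ds'', hds, hx0, hx1, hdeadx, hDx, hst'⟩ := hstack
  injection hds with hds1 hds2
  subst hds2
  have hlen1 : ((pySet a x true).length : Int) = n := by rw [length_pySet]; exact hlen
  have halive1x : aliveAt (pySet a x true) x = true :=
    aliveAt_pySet_self a x true hx0 (by omega)
  have hback : pySet (pySet a x true) x false = a :=
    pySet_cancel a x false hx0 (by omega) hdeadx
  obtain ⟨p1, p2, p3, p4⟩ := prvScan_spec (pySet a x true) x
  obtain ⟨e1, e2, e3, e4⟩ := nxtScan_spec n (pySet a x true) x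
  have hl1 : -1 ≤ prvScan (pySet a x true) x := p4 hx0
  have hrn : nxtScan n (pySet a x true) x ≤ n := e4 hx1
  -- scans of a expressed through scans of the restored list
  have hnxtA : ∀ i, -1 ≤ i → nxtScan n a i =
      if nxtScan n (pySet a x true) i = x then nxtScan n (pySet a x true) x
      else nxtScan n (pySet a x true) i := by
    intro i hi
    have h' := nxtScan_pySet_false n (pySet a x true) x i hlen1 hx0 hx1 halive1x hi
    rw [hback] at h'
    exact h'
  have hprvA : ∀ i, prvScan a i =
      if prvScan (pySet a x true) i = x then prvScan (pySet a x true) x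
      else prvScan (pySet a x true) i := by
    intro i
    have h' := prvScan_pySet_false n (pySet a x true) x i hlen1 hx0 hx1 halive1x
    rw [hback] at h'
    exact h'
  have htrans : ∀ i, 0 ≤ i → i ≠ x → aliveAt (pySet a x true) i = aliveAt a i := by
    intro i hi hne
    exact aliveAt_pySet_ne a x i true hx0 hi hne
  have hSOSl : SOS n a (prvScan (pySet a x true) x) := by
    rcases lt_or_ge (prvScan (pySet a x true) x) 0 with h' | h'
    · left; omega
    · right; right
      refine ⟨h', by omega, ?_⟩
      rw [← htrans _ h' (by omega)]
      exact p2 h'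
  have hSOSr : SOS n a (nxtScan n (pySet a x true) x) := by
    rcases eq_or_lt_of_le hrn with h' | h'
    · right; left; exact h'
    · right; right
      refine ⟨by omega, h', ?_⟩
      rw [← htrans _ (by omega) (by omega)]
      exact e2 h'
  have hprl : D.getD (prvScan (pySet a x true) x) [] =
      [prvScan a (prvScan (pySet a x true) x), nxtScan n a (prvScan (pySet a x true) x)] :=
    hchar _ hSOSl
  have hprr : D.getD (nxtScan n (pySet a x true) x) [] =
      [prvScan a (nxtScan n (pySet a x true) x), nxtScan n a (nxtScan n (pySet a x true) x)] :=
    hchar _ hSOSr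
  have hlrne : prvScan (pySet a x true) x ≠ nxtScan n (pySet a x true) x := by omega
  have hv1 : (D.getD (prvScan (pySet a x true) x) []).set 1 x =
      [prvScan a (prvScan (pySet a x true) x), x] := by
    rw [hprl]; rfl
  have hv2 : (((D.insert (prvScan (pySet a x true) x)
        [prvScan a (prvScan (pySet a x true) x), x]).getD (nxtScan n (pySet a x true) x) []).set 0 x =
      [x, nxtScan n a (nxtScan n (pySet a x true) x)]) := by
    rw [PySem.Dict.getD_insert, if_neg (Ne.symm hlrne), hprr]; rfl
  refine ⟨hv1, hv2, ?_⟩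
  set D' := (D.insert (prvScan (pySet a x true) x)
      [prvScan a (prvScan (pySet a x true) x), x]).insert
    (nxtScan n (pySet a x true) x) [x, nxtScan n a (nxtScan n (pySet a x true) x)] with hD'
  have hgetD' : ∀ i, D'.getD i [] =
      if i = nxtScan n (pySet a x true) x then [x, nxtScan n a (nxtScan n (pySet a x true) x)]
      else if i = prvScan (pySet a x true) x then [prvScan a (prvScan (pySet a x true) x), x]
      else D.getD i [] := by
    intro i
    rw [hD', PySem.Dict.getD_insert, PySem.Dict.getD_insert]
  refine ⟨hlen1, ?_, ?_, ?_, ?_⟩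
  · -- dead rows of the restored list are on the popped stack
    intro i hi0 hi1 hidead
    have hix : i ≠ x := by
      intro habs; rw [habs, halive1x] at hidead; simp at hidead
    rw [htrans i hi0 hix] at hidead
    rcases List.mem_cons.mp (hdeadIff i hi0 hi1 hidead) with habs | h'
    · exact absurd habs hix
    · exact h'
  · -- the cursor is still alive
    intro hc0 hc1
    by_cases hcx : cur = x
    · rw [hcx]; exact halive1x
    · rw [htrans cur hc0 hcx]; exact hcur hc0 hc1
  · -- DictChar for the restored row set
    intro i hsos
    rw [hgetD' i]
    by_cases hir : i = nxtScan n (pySet a x true) x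
    · rw [if_pos hir, hir]
      have hpi : prvScan (pySet a x true) (nxtScan n (pySet a x true) x) = x :=
        prv_nxt_of_alive n (pySet a x true) x hx0 halive1x
      have hni : nxtScan n a (nxtScan n (pySet a x true) x) =
          nxtScan n (pySet a x true) (nxtScan n (pySet a x true) x) := by
        rw [hnxtA _ (by omega), if_neg]
        obtain ⟨f1, _, _, _⟩ := nxtScan_spec n (pySet a x true) (nxtScan n (pySet a x true) x)
        omega
      rw [hpi, hni]
    · rw [if_neg hir]
      by_cases hil : i = prvScan (pySet a x true) x
      · rw [if_pos hil, hil]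
        have hni : nxtScan n (pySet a x true) (prvScan (pySet a x true) x) = x :=
          nxt_prv_of_alive n (pySet a x true) x hx0 hx1 halive1x
        have hpi : prvScan a (prvScan (pySet a x true) x) =
            prvScan (pySet a x true) (prvScan (pySet a x true) x) := by
          rw [hprvA _, if_neg]
          obtain ⟨f1, _, _, _⟩ := prvScan_spec (pySet a x true) (prvScan (pySet a x true) x)
          omega
        rw [hni, hpi]
      · rw [if_neg hil]
        by_cases hix : i = x
        · -- the restored row itself: its entry was never touched while it was dead
          rw [hix, hDx]
        · -- a row untouched by the relink
          have hsosA : SOS n a i := by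
            rcases hsos with h' | h' | ⟨g0, g1, g2⟩
            · exact Or.inl h'
            · exact Or.inr (Or.inl h')
            · exact Or.inr (Or.inr ⟨g0, g1, by rw [← htrans i g0 hix]; exact g2⟩)
          have hige : -1 ≤ i := by
            rcases hsosA with h' | h' | ⟨g0, _, _⟩ <;> omega
          rw [hchar i hsosA]
          have hni : nxtScan n (pySet a x true) i ≠ x := by
            intro habs
            rcases hsos with h' | h' | ⟨g0, g1, g2⟩
            · -- i = -1 : then x would be the first alive row, i.e. the popped row's left link
              refine hil ?_
              rw [h']
              refine (prvScan_eq_neg_one (pySet a x true) x hx0 ?_).symm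
              intro m hm0 hm1
              obtain ⟨f1, f2, f3, f4⟩ := nxtScan_spec n (pySet a x true) (-1)
              rw [h'] at habs
              exact (f3 m (by omega) (by omega)).2
            · rw [h'] at habs
              rw [nxtScan_of_ge n (pySet a x true) n (le_refl n)] at habs
              omega
            · refine hil ?_
              have h2 : i = prvScan (pySet a x true) (nxtScan n (pySet a x true) i) :=
                (prv_nxt_of_alive n (pySet a x true) i g0 g2).symm
              rw [habs] at h2
              exact h2
          have hpi : prvScan (pySet a x true) i ≠ x := by
            intro habs
            rcases hsos with h' | h' | ⟨g0, g1, g2⟩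
            · rw [h'] at habs
              rw [prvScan_of_nonpos (pySet a x true) (-1) (by omega)] at habs
              omega
            · refine hir ?_
              rw [h']
              refine (nxtScan_eq_n n (pySet a x true) x hx1 ?_).symm
              intro m hm0 hm1
              obtain ⟨f1, f2, f3, f4⟩ := prvScan_spec (pySet a x true) n
              rw [h'] at habs
              exact (f3 m (by omega) (by omega)).2
            · refine hir ?_
              have h2 : i = nxtScan n (pySet a x true) (prvScan (pySet a x true) i) :=
                (nxt_prv_of_alive n (pySet a x true) i g0 g1 g2).symm
              rw [habs] at h2
              exact h2
          have h1' : nxtScan n a i = nxtScan n (pySet a x true) i := by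
            rw [hnxtA i hige, if_neg hni]
          have h2' : prvScan a i = prvScan (pySet a x true) i := by
            rw [hprvA i, if_neg hpi]
          rw [h1', h2']
  · -- StackInv for the popped stack
    refine stackInv_congrD n D D' us' (pySet a x true) ds' ?_ hst'
    intro y hy
    obtain ⟨g0, g1, g2⟩ := stackInv_mem n D us' (pySet a x true) ds' hlen1 hst' y hy
    have hyl : y ≠ prvScan (pySet a x true) x := by
      rcases lt_or_ge (prvScan (pySet a x true) x) 0 with h' | h'
      · omega
      · intro habs
        rw [← habs] at p2
        rw [p2 (habs ▸ h')] at g2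
        simp at g2
    have hyr : y ≠ nxtScan n (pySet a x true) x := by
      rcases eq_or_lt_of_le hrn with h' | h'
      · omega
      · intro habs
        have := e2 h'
        rw [← habs] at this
        rw [this] at g2
        simp at g2
    rw [hgetD' y, if_neg hyr, if_neg hyl]

theorem move_arm (n : Int) (D : PySem.Dict Int (List Int)) (ds : List (Int × List Int))
    (a : List Bool) (us : List Int) (isU : Bool) :
    ∀ (k : Nat) (cur cur' : Int),
    SimInv n D ds a us cur →
    moveChk n (if isU then prvScan a else nxtScan n a) k cur = some cur' →
    repIter (fun cu => if isU then idx0 (D.getD cu []) else idx1 (D.getD cu [])) k cur = cur' ∧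
    SimInv n D ds a us cur' := by
  intro k
  induction k with
  | zero =>
    intro cur cur' hInv hmv
    simp only [moveChk, Option.some.injEq] at hmv
    subst hmv
    exact ⟨rfl, hInv⟩
  | succ k ih =>
    intro cur cur' hInv hmv
    simp only [moveChk] at hmv
    by_cases hc : -1 ≤ cur ∧ cur ≤ n
    · rw [if_pos hc] at hmv
      have hsos : SOS n a cur := by
        rcases eq_or_lt_of_le hc.1 with h' | h'
        · exact Or.inl h'.symm
        · rcases eq_or_lt_of_le hc.2 with h'' | h''
          · exact Or.inr (Or.inl h'')
          · exact Or.inr (Or.inr ⟨by omega, h'', hInv.2.2.1 (by omega) h''⟩)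
      have hD : D.getD cur [] = [prvScan a cur, nxtScan n a cur] := hInv.2.2.2.1 cur hsos
      have hstep : (fun cu => if isU then idx0 (D.getD cu []) else idx1 (D.getD cu [])) cur =
          (if isU then prvScan a else nxtScan n a) cur := by
        cases isU <;> simp [hD, idx0_pair, idx1_pair]
      have hInv' : SimInv n D ds a us ((if isU then prvScan a else nxtScan n a) cur) := by
        obtain ⟨g1, g2, g3, g4, g5⟩ := hInv
        refine ⟨g1, g2, ?_, g4, g5⟩
        intro hc0 hc1
        cases isU
        · simp only [Bool.false_eq_true, if_false] at hc0 hc1 ⊢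
          exact (nxtScan_spec n a cur).2.1 hc1
        · simp only [if_true] at hc0 hc1 ⊢
          exact (prvScan_spec a cur).2.1 hc0
      obtain ⟨ihe, ihi⟩ := ih _ cur' hInv' hmv
      refine ⟨?_, ihi⟩
      simp only [repIter, hstep]
      exact ihe
    · rw [if_neg hc] at hmv
      exact absurd hmv (by simp)

theorem moveChk_run (n : Int) (f : Int → Int) :
    ∀ (k : Nat) (cur cur' : Int), moveChk n f k cur = some cur' → repIter f k cur = cur' := by
  intro k
  induction k with
  | zero =>
    intro cur cur' h
    simp only [moveChk, Option.some.injEq] at h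
    exact h
  | succ k ih =>
    intro cur cur' h
    simp only [moveChk] at h
    by_cases hc : -1 ≤ cur ∧ cur ≤ n
    · rw [if_pos hc] at h
      simp only [repIter]
      exact ih _ _ h
    · rw [if_neg hc] at h
      exact absurd h (by simp)

theorem moveChk_congr (n : Int) (f g : Int → Int)
    (h : ∀ c, -1 ≤ c → c ≤ n → f c = g c) :
    ∀ (k : Nat) (cur : Int), moveChk n f k cur = moveChk n g k cur := by
  intro k
  induction k with
  | zero => intro cur; rfl
  | succ k ih =>
    intro cur
    simp only [moveChk]
    by_cases hc : -1 ≤ cur ∧ cur ≤ n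
    · rw [if_pos hc, if_pos hc, h cur hc.1 hc.2, ih]
    · rw [if_neg hc, if_neg hc]

theorem filter_shrink (st : List Int) (j : Int) (hnd : st.Nodup) (hj : j ∈ st) :
    (st.filter (fun m => decide (j+1 ≤ m))).length < (st.filter (fun m => decide (j ≤ m))).length := by
  induction st with
  | nil => simp at hj
  | cons y ys ih =>
    rcases List.mem_cons.mp hj with rfl | hj'
    · simp only [List.filter_cons]
      rw [if_neg (by simp), if_pos (by simp)]
      simp only [List.length_cons]
      have hsub : (ys.filter (fun m => decide (j+1 ≤ m))).length ≤
          (ys.filter (fun m => decide (j ≤ m))).length :=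
        (List.monotone_filter_right ys (by intro a ha; simp at ha ⊢; omega)).length_le
      omega
    · have hnd' : ys.Nodup := (List.nodup_cons.mp hnd).2
      have ihh := ih hnd' hj'
      simp only [List.filter_cons]
      by_cases h1 : j + 1 ≤ y
      · rw [if_pos (by simpa using h1), if_pos (by simp; omega)]
        simp only [List.length_cons]
        omega
      · by_cases h2 : j ≤ y
        · rw [if_neg (by simpa using h1), if_pos (by simpa using h2)]
          simp only [List.length_cons]
          omega
        · rw [if_neg (by simpa using h1), if_neg (by simpa using h2)]
          omega

theorem filter_shrink_le (st : List Int) (j : Int) (hnd : st.Nodup) (hj : j ∈ st) :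
    (st.filter (fun m => decide (m ≤ j-1))).length < (st.filter (fun m => decide (m ≤ j))).length := by
  induction st with
  | nil => simp at hj
  | cons y ys ih =>
    rcases List.mem_cons.mp hj with rfl | hj'
    · simp only [List.filter_cons]
      rw [if_neg (by simp), if_pos (by simp)]
      simp only [List.length_cons]
      have hsub : (ys.filter (fun m => decide (m ≤ j-1))).length ≤
          (ys.filter (fun m => decide (m ≤ j))).length :=
        (List.monotone_filter_right ys (by intro a ha; simp at ha ⊢; omega)).length_le
      omega
    · have hnd' : ys.Nodup := (List.nodup_cons.mp hnd).2
      have ihh := ih hnd' hj'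
      simp only [List.filter_cons]
      by_cases h1 : y ≤ j - 1
      · rw [if_pos (by simpa using h1), if_pos (by simp; omega)]
        simp only [List.length_cons]
        omega
      · by_cases h2 : y ≤ j
        · rw [if_neg (by simpa using h1), if_pos (by simpa using h2)]
          simp only [List.length_cons]
          omega
        · rw [if_neg (by simpa using h1), if_neg (by simpa using h2)]
          omega

theorem nxtV_spec (n : Int) (st : List Int) (hnd : st.Nodup) :
    ∀ (f : Nat) (j : Int), (st.filter (fun m => decide (j ≤ m))).length < f →
    j ≤ nxtV n st f j ∧
    (nxtV n st f j < n → nxtV n st f j ∉ st) ∧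
    (∀ m, j ≤ m → m < nxtV n st f j → m < n ∧ m ∈ st) ∧
    (j ≤ n → nxtV n st f j ≤ n) := by
  intro f
  induction f with
  | zero => intro j hf; omega
  | succ f ih =>
    intro j hf
    simp only [nxtV]
    by_cases hc : j < n ∧ j ∈ st
    · rw [if_pos hc]
      have hlt := filter_shrink st j hnd hc.2
      obtain ⟨i1, i2, i3, i4⟩ := ih (j+1) (by omega)
      refine ⟨by omega, i2, ?_, fun _ => i4 (by omega)⟩
      intro m hm1 hm2
      rcases eq_or_lt_of_le hm1 with h | h
      · exact ⟨by omega, h ▸ hc.2⟩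
      · exact i3 m (by omega) hm2
    · rw [if_neg hc]
      refine ⟨le_refl _, ?_, by omega, by omega⟩
      intro hjn
      rcases Decidable.not_and_iff_not_or_not.mp hc with h' | h'
      · omega
      · exact h'

theorem prvV_spec (st : List Int) (hnd : st.Nodup) :
    ∀ (f : Nat) (j : Int), (st.filter (fun m => decide (m ≤ j))).length < f →
    prvV st f j ≤ j ∧
    (0 ≤ prvV st f j → prvV st f j ∉ st) ∧
    (∀ m, prvV st f j < m → m ≤ j → m ∈ st) ∧
    (-1 ≤ j → -1 ≤ prvV st f j) := by
  intro f
  induction f with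
  | zero => intro j hf; omega
  | succ f ih =>
    intro j hf
    simp only [prvV]
    by_cases hc : 0 ≤ j ∧ j ∈ st
    · rw [if_pos hc]
      have hlt : (st.filter (fun m => decide (m ≤ j-1))).length <
          (st.filter (fun m => decide (m ≤ j))).length := filter_shrink_le st j hnd hc.2
      obtain ⟨i1, i2, i3, i4⟩ := ih (j-1) (by omega)
      refine ⟨by omega, i2, ?_, fun _ => i4 (by omega)⟩
      intro m hm1 hm2
      rcases eq_or_lt_of_le hm2 with h | h
      · exact h ▸ hc.2
      · exact i3 m hm1 (by omega)
    · rw [if_neg hc]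
      refine ⟨le_refl _, ?_, by omega, by omega⟩
      intro hj0
      rcases Decidable.not_and_iff_not_or_not.mp hc with h' | h'
      · omega
      · exact h'

theorem nxtScanV_eq (n : Int) (st : List Int) (a : List Bool)
    (hnd : st.Nodup) (hmem : ∀ x ∈ st, 0 ≤ x ∧ x < n)
    (hcorr : ∀ i, 0 ≤ i → i < n → (aliveAt a i = false ↔ i ∈ st))
    (c : Int) (hc : -1 ≤ c) : nxtScanV n st c = nxtScan n a c := by
  have hfuel : (st.filter (fun m => decide (c+1 ≤ m))).length < st.length + 1 :=
    Nat.lt_succ_of_le (List.length_filter_le _ _)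
  obtain ⟨v1, v2, v3, v4⟩ := nxtV_spec n st hnd (st.length+1) (c+1) hfuel
  have hdef : nxtV n st (st.length+1) (c+1) = nxtScanV n st c := rfl
  rw [hdef] at v1 v2 v3 v4
  rcases le_or_gt n c with h | h
  · have hV : nxtScanV n st c = c + 1 := by
      unfold nxtScanV
      simp only [nxtV]
      rw [if_neg (by rintro ⟨h1, _⟩; omega)]
    rw [hV, nxtScan_of_ge n a c h]
  · have hle : nxtScanV n st c ≤ n := v4 (by omega)
    rcases eq_or_lt_of_le hle with hj | hj
    · rw [hj]
      refine (nxtScan_eq_n n a c h ?_).symm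
      intro m hm1 hm2
      have := v3 m (by omega) (by omega)
      exact (hcorr m (by omega) this.1).mpr this.2
    · refine (nxtScan_eq_of_alive n a c (nxtScanV n st c) (by omega) hj ?_ ?_).symm
      · have hns : nxtScanV n st c ∉ st := v2 hj
        have h0 : 0 ≤ nxtScanV n st c := by unfold nxtScanV; omega
        rcases hb : aliveAt a (nxtScanV n st c) with _ | _
        · exact absurd ((hcorr _ h0 hj).mp hb) hns
        · rfl
      · intro m hm1 hm2
        have := v3 m (by omega) (by omega)
        exact (hcorr m (by omega) this.1).mpr this.2

theorem prvScanV_eq (n : Int) (st : List Int) (a : List Bool)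
    (hnd : st.Nodup) (hmem : ∀ x ∈ st, 0 ≤ x ∧ x < n)
    (hcorr : ∀ i, 0 ≤ i → i < n → (aliveAt a i = false ↔ i ∈ st))
    (c : Int) (hc : c ≤ n) : prvScanV st c = prvScan a c := by
  have hfuel : (st.filter (fun m => decide (m ≤ c-1))).length < st.length + 1 :=
    Nat.lt_succ_of_le (List.length_filter_le _ _)
  obtain ⟨v1, v2, v3, v4⟩ := prvV_spec st hnd (st.length+1) (c-1) hfuel
  have hdef : prvV st (st.length+1) (c-1) = prvScanV st c := rfl
  rw [hdef] at v1 v2 v3 v4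
  rcases le_or_gt c 0 with h | h
  · have hV : prvScanV st c = c - 1 := by
      unfold prvScanV
      simp only [prvV]
      rw [if_neg (by rintro ⟨h1, _⟩; omega)]
    rw [hV, prvScan_of_nonpos a c h]
  · rcases lt_or_ge (prvScanV st c) 0 with hj | hj
    · have hj1 : prvScanV st c = -1 := by
        have := v4 (by omega)
        omega
      rw [hj1]
      refine (prvScan_eq_neg_one a c (by omega) ?_).symm
      intro m hm0 hm1
      have hmem' := v3 m (by omega) (by omega)
      exact (hcorr m hm0 (hmem m hmem').2).mpr hmem'
    · refine (prvScan_eq_of_alive a c (prvScanV st c) (by omega) hj ?_ ?_).symm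
      · have hns : prvScanV st c ∉ st := v2 hj
        have hjn : prvScanV st c < n := by omega
        rcases hb : aliveAt a (prvScanV st c) with _ | _
        · exact absurd ((hcorr _ hj hjn).mp hb) hns
        · rfl
      · intro m hm1 hm2
        have hmem' := v3 m hm1 (by omega)
        exact (hcorr m (by omega) (hmem m hmem').2).mpr hmem'

theorem loop_eq (n : Int) :
    ∀ (cmds : List String) (D : PySem.Dict Int (List Int)) (ds : List (Int × List Int))
      (a : List Bool) (us : List Int) (cur : Int),
    SimInv n D ds a us cur → validFrom n cmds us cur = true →
    (cmds.foldl (stepA n) (D, ds, cur)).2.2 = (cmds.foldl (stepB n) (a, us, cur)).2.2 ∧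
    SimInv n (cmds.foldl (stepA n) (D, ds, cur)).1 (cmds.foldl (stepA n) (D, ds, cur)).2.1
      (cmds.foldl (stepB n) (a, us, cur)).1 (cmds.foldl (stepB n) (a, us, cur)).2.1
      (cmds.foldl (stepB n) (a, us, cur)).2.2 := by
  intro cmds
  induction cmds with
  | nil =>
    intro D ds a us cur hInv _
    exact ⟨rfl, hInv⟩
  | cons c rest ih =>
    intro D ds a us cur hInv hv
    have hlen := hInv.1
    have hnd : us.Nodup := stackInv_nodup n D us a ds hlen hInv.2.2.2.2
    have hmem : ∀ x ∈ us, 0 ≤ x ∧ x < n ∧ aliveAt a x = false :=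
      stackInv_mem n D us a ds hlen hInv.2.2.2.2
    have hcorr : ∀ i, 0 ≤ i → i < n → (aliveAt a i = false ↔ i ∈ us) := by
      intro i h0 h1
      exact ⟨hInv.2.1 i h0 h1, fun hm => (hmem i hm).2.2⟩
    unfold validFrom at hv
    split at hv
    · exact absurd hv (by simp)
    next h t hsplit =>
      simp only [List.foldl_cons]
      split at hv
      next hC =>
        subst hC
        split at hv
        next hcur =>
          obtain ⟨hA, hB, hnx, hpv, hinv'⟩ :=
            C_arm n D ds a us cur c t hsplit hInv hcur.1 hcur.2
          rw [hA, hB]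
          refine ih _ _ _ _ _ hinv' ?_
          -- translate the stack-side scans in hv into list-side scans
          have hndC : (cur :: us).Nodup := by
            refine List.nodup_cons.mpr ⟨?_, hnd⟩
            intro habs
            have := (hmem cur habs).2.2
            rw [hInv.2.2.1 hcur.1 hcur.2] at this
            simp at this
          have hmemC : ∀ x ∈ cur :: us, 0 ≤ x ∧ x < n := by
            intro x hx
            rcases List.mem_cons.mp hx with rfl | hx'
            · exact ⟨hcur.1, hcur.2⟩
            · exact ⟨(hmem x hx').1, (hmem x hx').2.1⟩
          have hcorrC : ∀ i, 0 ≤ i → i < n →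
              (aliveAt (pySet a cur false) i = false ↔ i ∈ cur :: us) := by
            intro i h0 h1
            by_cases hic : i = cur
            · subst hic
              rw [aliveAt_pySet_self a i false h0 (by omega)]
              simp
            · rw [aliveAt_pySet_ne a cur i false hcur.1 h0 hic]
              rw [hcorr i h0 h1]
              simp [hic]
          have e1 : nxtScanV n (cur :: us) cur = nxtScan n a cur := by
            rw [nxtScanV_eq n (cur :: us) (pySet a cur false) hndC hmemC hcorrC cur (by omega)]
            exact hnx
          have e2 : prvScanV (cur :: us) cur = prvScan a cur := by
            rw [prvScanV_eq n (cur :: us) (pySet a cur false) hndC hmemC hcorrC cur (by omega)]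
            exact hpv
          simp only [e1, e2] at hv
          exact hv
        next hcur => exact absurd hv (by simp)
      next hC =>
        split at hv
        next hZ =>
          subst hZ
          split at hv
          · exact absurd hv (by simp)
          next x us' =>
            obtain ⟨hlen', hdeadIff, hcur', hchar, hstack⟩ := hInv
            obtain ⟨ds', hds, hx0, hx1, hdeadx, hDx, hst'⟩ := hstack
            subst hds
            have hInv2 : SimInv n D
                ((x, [prvScan (pySet a x true) x, nxtScan n (pySet a x true) x]) :: ds')
                a (x :: us') cur :=
              ⟨hlen', hdeadIff, hcur', hchar, ds', rfl, hx0, hx1, hdeadx, hDx, hst'⟩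
            obtain ⟨hv1, hv2, hinv'⟩ := Z_arm n D ds' a x us' cur hInv2
            have hA : stepA n (D, (x, [prvScan (pySet a x true) x,
                nxtScan n (pySet a x true) x]) :: ds', cur) c =
                ((D.insert (prvScan (pySet a x true) x)
                    [prvScan a (prvScan (pySet a x true) x), x]).insert
                  (nxtScan n (pySet a x true) x)
                    [x, nxtScan n a (nxtScan n (pySet a x true) x)], ds', cur) := by
              show (if ((PySem.List.pyGet? (PySem.Str.split₀ c) 0).getD "") = "C" then _ else _) = _
              rw [hsplit, pyget0]
              simp only [Option.getD_some]
              rw [if_neg (by decide), if_true]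
              simp only [idx0_pair, idx1_pair]
              rw [hv1, hv2]
            have hB : stepB n (a, x :: us', cur) c = (pySet a x true, us', cur) := by
              show (if ((PySem.List.pyGet? (PySem.Str.split₀ c) 0).getD "") = "C" then _ else _) = _
              rw [hsplit, pyget0]
              simp only [Option.getD_some]
              rw [if_neg (by decide), if_true]
            rw [hA, hB]
            exact ih _ _ _ _ _ hinv' hv
        next hZ =>
          split at hv
          · exact absurd hv (by simp)
          next xs t' =>
            split at hv
            · exact absurd hv (by simp)
            next X hX =>
              split at hv
              · exact absurd hv (by simp)
              next cur' hmv =>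
                have hXval : ∀ h0 : String, (PySem.Int.ofStr?
                    ((PySem.List.pyGet? (h0 :: xs :: t') 1).getD "")).getD 0 = X := by
                  intro h0
                  rw [pyget1, Option.getD_some, hX, Option.getD_some]
                have hmv' : moveChk n (if h = "U" then prvScan a else nxtScan n a)
                    X.toNat cur = some cur' := by
                  rw [← hmv]
                  refine (moveChk_congr n _ _ ?_ X.toNat cur).symm
                  intro cc hc1 hc2
                  by_cases hU : h = "U"
                  · rw [if_pos hU, if_pos hU]
                    exact prvScanV_eq n us a hnd (fun x hx => ⟨(hmem x hx).1, (hmem x hx).2.1⟩)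
                      hcorr cc hc2
                  · rw [if_neg hU, if_neg hU]
                    exact nxtScanV_eq n us a hnd (fun x hx => ⟨(hmem x hx).1, (hmem x hx).2.1⟩)
                      hcorr cc hc1
                by_cases hU : h = "U"
                · subst hU
                  rw [if_pos rfl] at hmv'
                  obtain ⟨hrep, hinv'⟩ := move_arm n D ds a us true X.toNat cur cur' hInv
                    (by rw [if_pos rfl]; exact hmv')
                  have hA : stepA n (D, ds, cur) c = (D, ds, cur') := by
                    show (if ((PySem.List.pyGet? (PySem.Str.split₀ c) 0).getD "") = "C"
                      then _ else _) = _
                    rw [hsplit, pyget0]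
                    simp only [Option.getD_some]
                    rw [if_neg (by decide), if_neg (by decide), if_true, hXval _]
                    have h2 : repIter (fun cu => idx0 (D.getD cu [])) X.toNat cur = cur' := hrep
                    rw [h2]
                  have hB : stepB n (a, us, cur) c = (a, us, cur') := by
                    show (if ((PySem.List.pyGet? (PySem.Str.split₀ c) 0).getD "") = "C"
                      then _ else _) = _
                    rw [hsplit, pyget0]
                    simp only [Option.getD_some]
                    rw [if_neg (by decide), if_neg (by decide), if_true, hXval _]
                    rw [moveChk_run n (prvScan a) X.toNat cur cur' hmv']
                  rw [hA, hB]
                  exact ih _ _ _ _ _ hinv' hv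
                · rw [if_neg hU] at hmv'
                  obtain ⟨hrep, hinv'⟩ := move_arm n D ds a us false X.toNat cur cur' hInv
                    (by rw [if_neg (by simp)]; exact hmv')
                  have hA : stepA n (D, ds, cur) c = (D, ds, cur') := by
                    show (if ((PySem.List.pyGet? (PySem.Str.split₀ c) 0).getD "") = "C"
                      then _ else _) = _
                    rw [hsplit, pyget0]
                    simp only [Option.getD_some]
                    rw [if_neg (by exact hC), if_neg (by exact hZ), if_neg (by exact hU), hXval _]
                    have h2 : repIter (fun cu => idx1 (D.getD cu [])) X.toNat cur = cur' := hrep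
                    rw [h2]
                  have hB : stepB n (a, us, cur) c = (a, us, cur') := by
                    show (if ((PySem.List.pyGet? (PySem.Str.split₀ c) 0).getD "") = "C"
                      then _ else _) = _
                    rw [hsplit, pyget0]
                    simp only [Option.getD_some]
                    rw [if_neg (by exact hC), if_neg (by exact hZ), if_neg (by exact hU), hXval _]
                    rw [moveChk_run n (nxtScan n a) X.toNat cur cur' hmv']
                  rw [hA, hB]
                  exact ih _ _ _ _ _ hinv' hv

theorem getD_foldl_insert_pair (L : List Int) :
    ∀ (d : PySem.Dict Int (List Int)) (j : Int),
    (L.foldl (fun d i => d.insert i [i-1, i+1]) d).getD j [] =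
      if j ∈ L then [j-1, j+1] else d.getD j [] := by
  induction L with
  | nil => intro d j; simp
  | cons i L ih =>
    intro d j
    simp only [List.foldl_cons, ih]
    by_cases hjL : j ∈ L
    · simp [hjL]
    · by_cases hji : j = i
      · simp [hjL, hji, PySem.Dict.getD_insert]
      · simp [hjL, hji, PySem.Dict.getD_insert]

theorem getD_init (n : Int) (j : Int) :
    ((PySem.List.pyRange (-1) (n+1) 1).foldl (fun d i => d.insert i [i-1, i+1])
      PySem.Dict.empty).getD j [] = if -1 ≤ j ∧ j ≤ n then [j-1, j+1] else [] := by
  rw [getD_foldl_insert_pair]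
  by_cases h : j ∈ PySem.List.pyRange (-1) (n+1) 1
  · have := PySem.List.mem_pyRange_one.mp h
    rw [if_pos h, if_pos (by omega)]
  · have : ¬ (-1 ≤ j ∧ j ≤ n) := by
      intro habs
      exact h (PySem.List.mem_pyRange_one.mpr ⟨habs.1, by omega⟩)
    rw [if_neg h, if_neg this, PySem.Dict.getD_empty]

theorem aliveAt_replicate (n : Int) (i : Int) (h0 : 0 ≤ i) (h1 : i < n) :
    aliveAt (List.replicate n.toNat true) i = true := by
  unfold aliveAt
  rw [PySem.List.pyGetD_eq_getElem _ _ h0 (by simp; omega)]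
  simp

theorem nxtScan_replicate (n : Int) (i : Int) (hi : -1 ≤ i) :
    nxtScan n (List.replicate n.toNat true) i = i + 1 := by
  rcases le_or_gt n i with h | h
  · exact nxtScan_of_ge n _ i h
  · rcases lt_or_ge (i+1) n with h2 | h2
    · exact nxtScan_eq_of_alive n _ i (i+1) (by omega) h2
        (aliveAt_replicate n (i+1) (by omega) h2)
        (fun m hm1 hm2 => absurd hm2 (by omega))
    · have heq : i + 1 = n := by omega
      rw [heq]
      exact nxtScan_eq_n n _ i (by omega) (fun m hm1 hm2 => absurd hm2 (by omega))

theorem prvScan_replicate (n : Int) (i : Int) (hi : i ≤ n) (hn : 0 ≤ n) :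
    prvScan (List.replicate n.toNat true) i = i - 1 := by
  rcases le_or_gt i 0 with h | h
  · exact prvScan_of_nonpos _ i h
  · exact prvScan_eq_of_alive _ i (i-1) (by omega) (by omega)
      (aliveAt_replicate n (i-1) (by omega) (by omega)) (by omega)

theorem init_inv (n k : Int) (hn : 0 < n) :
    SimInv n ((PySem.List.pyRange (-1) (n+1) 1).foldl (fun d i => d.insert i [i-1, i+1])
      PySem.Dict.empty) [] (List.replicate n.toNat true) [] k := by
  refine ⟨by simp; omega, ?_, ?_, ?_, rfl⟩
  · intro i h0 h1 hdead
    rw [aliveAt_replicate n i h0 h1] at hdead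
    simp at hdead
  · intro h0 h1
    exact aliveAt_replicate n k h0 h1
  · intro i hsos
    have hrange : -1 ≤ i ∧ i ≤ n := by
      rcases hsos with h' | h' | ⟨g0, g1, _⟩ <;> omega
    rw [getD_init n i, if_pos hrange, nxtScan_replicate n i hrange.1,
      prvScan_replicate n i hrange.2 (by omega)]

theorem stepB_length (n : Int) (a : List Bool) (us : List Int) (cur : Int) (c : String) :
    ((stepB n (a, us, cur) c).1).length = a.length := by
  unfold stepB
  by_cases h1 : ((PySem.List.pyGet? (PySem.Str.split₀ c) 0).getD "") = "C"
  · simp [h1, length_pySet]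
  · by_cases h2 : ((PySem.List.pyGet? (PySem.Str.split₀ c) 0).getD "") = "Z"
    · cases us with
      | nil => simp [h1, h2]
      | cons x rest => simp [h1, h2, length_pySet]
    · by_cases h3 : ((PySem.List.pyGet? (PySem.Str.split₀ c) 0).getD "") = "U"
      · simp [h1, h2, h3]
      · simp [h1, h2, h3]

theorem foldl_stepB_length (n : Int) (cmds : List String) :
    ∀ (a : List Bool) (us : List Int) (cur : Int),
    ((cmds.foldl (stepB n) (a, us, cur)).1).length = a.length := by
  induction cmds with
  | nil => intro a us cur; rfl
  | cons c rest ih =>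
    intro a us cur
    simp only [List.foldl_cons]
    rcases hst : stepB n (a, us, cur) c with ⟨a', us', cur'⟩
    have := stepB_length n a us cur c
    rw [hst] at this
    rw [ih a' us' cur']
    exact this

theorem renderA_chars (P : Int → Prop) [DecidablePred P] :
    ∀ (L : List Int) (s : String),
    (L.foldl (fun ans i => if P i then ans ++ "X" else ans ++ "O") s).toList =
      s.toList ++ L.map (fun i => if P i then 'X' else 'O') := by
  intro L
  induction L with
  | nil => intro s; simp
  | cons i L ih =>
    intro s
    simp only [List.foldl_cons, List.map_cons]
    by_cases h : P i
    · rw [if_pos h, if_pos h, ih, String.toList_append]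
      simp
    · rw [if_neg h, if_neg h, ih, String.toList_append]
      simp

theorem renderB_chars (a : List Bool) :
    (PySem.Str.join "" (a.map (fun b => if b then "O" else "X"))).toList =
      a.map (fun b => if b then 'O' else 'X') := by
  rw [PySem.Str.toList_join]
  have h1 : (a.map (fun b => if b then "O" else "X")).map String.toList =
      (a.map (fun b => if b then 'O' else 'X')).map (fun c => [c]) := by
    rw [List.map_map, List.map_map]
    apply List.map_congr_left
    intro b _
    cases b <;> rfl
  rw [h1]
  have h2 : ("" : String).toList = [] := rfl
  rw [h2, PySem.Chars.join_nil_singletons]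

theorem render_cell (n : Int) (D : PySem.Dict Int (List Int)) (ds : List (Int × List Int))
    (a : List Bool) (us : List Int) (cur : Int) (hInv : SimInv n D ds a us cur)
    (i : Int) (h0 : 0 ≤ i) (h1 : i < n) :
    (if idx1 (D.getD (idx0 (D.getD i [])) []) ≠ i then 'X' else 'O') =
      (if aliveAt a i = true then 'O' else 'X') := by
  obtain ⟨hlen, hdeadIff, hcur, hchar, hstack⟩ := hInv
  by_cases ha : aliveAt a i = true
  · rw [if_pos ha]
    have hsos : SOS n a i := Or.inr (Or.inr ⟨h0, h1, ha⟩)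
    rw [hchar i hsos, idx0_pair]
    obtain ⟨p1, p2, p3, p4⟩ := prvScan_spec a i
    have hsosl : SOS n a (prvScan a i) := by
      rcases lt_or_ge (prvScan a i) 0 with h' | h'
      · left; omega
      · right; right; exact ⟨h', by omega, p2 h'⟩
    rw [hchar _ hsosl, idx1_pair, nxt_prv_of_alive n a i h0 h1 ha]
    simp
  · rw [if_neg ha]
    have hdead : aliveAt a i = false := by simpa using ha
    have hmem : i ∈ us := hdeadIff i h0 h1 hdead
    have hne := dead_ptr n D us a ds hlen (hgood_of_dictChar n D a hchar) hstack i hmem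
    rw [if_pos hne]

theorem render_eq (n : Int) (D : PySem.Dict Int (List Int)) (ds : List (Int × List Int))
    (a : List Bool) (us : List Int) (cur : Int) (hn : 0 < n) (hInv : SimInv n D ds a us cur) :
    (PySem.List.pyRange 0 n 1).foldl (fun ans i =>
      if idx1 (D.getD (idx0 (D.getD i [])) []) ≠ i then ans ++ "X" else ans ++ "O") "" =
    PySem.Str.join "" (a.map (fun b => if b then "O" else "X")) := by
  apply String.toList_inj.mp
  rw [renderA_chars (fun i => idx1 (D.getD (idx0 (D.getD i [])) []) ≠ i), renderB_chars]
  have h0 : ("" : String).toList = [] := rfl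
  rw [h0, List.nil_append]
  have hlen : a.length = n.toNat := by
    have := hInv.1
    omega
  have hrange := PySem.List.pyRange_zero_natCast n.toNat
  rw [show ((n.toNat : Nat) : Int) = n by omega] at hrange
  rw [hrange, List.map_map]
  apply List.ext_getElem
  · simp [hlen]
  · intro k hk1 hk2
    simp only [List.getElem_map, List.getElem_range]
    have hk : k < n.toNat := by simpa using hk1
    have hcell := render_cell n D ds a us cur hInv (k : Int) (by omega) (by omega)
    have hak : aliveAt a (k : Int) = a[k] := by
      unfold aliveAt
      rw [PySem.List.pyGetD_eq_getElem _ _ (by omega) (by simp [hlen]; omega)]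
      simp
    rw [hak] at hcell
    simpa using hcell


-- ===== VERDICT (by name: the statement is the Claim_ definition above) =====
theorem solution_spec : Claim_equal_solution := by
  intro n k cmd _hdom hpre
  unfold Spec_solution solution solution_alt
  by_cases hn : 0 < n
  · have h := loop_eq n cmd _ [] (List.replicate n.toNat true) [] k (init_inv n k hn) hpre
    exact render_eq n _ _ _ _ _ hn h.2
  · -- n ≤ 0: A renders the empty range, B renders the empty row list
    have hA : PySem.List.pyRange 0 n 1 = [] := by
      simp only [PySem.List.pyRange]
      rw [if_neg (by norm_num), if_pos (by norm_num), if_neg (by omega)]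
      rfl
    have hnil : (cmd.foldl (stepB n) (List.replicate n.toNat true, [], k)).1 = [] := by
      refine List.eq_nil_of_length_eq_zero ?_
      rw [foldl_stepB_length n cmd (List.replicate n.toNat true) [] k]
      simp
      omega
    rw [hA]
    simp only [hnil]
    rfl
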